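-- pv_equiv track=rewrite | github.com/MetaBeeAI/pipeline | llm_benchmarking/process_benchmarking.py | _check_answers_identical
-- ===== SOURCE A (Python) =====
-- def _check_answers_identical(llm_answer: str, rev1_answer: str, rev2_answer: str) -> tuple[bool, str]:
--     """
--     Check if answers are identical or if some are missing/empty.
--     Returns True if we can optimize by processing only one answer.
--
--     Args:
--         llm_answer: LLM answer text
--         rev1_answer: Reviewer 1 answer text
--         rev2_answer: Reviewer 2 answer text
--
--     Returns:
--         Tuple of (can_optimize, primary_answer_to_process)
--     """
--     # Normalize answers for comparison (remove extra whitespace, convert to lowercase)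
--     llm_norm = llm_answer.strip().lower() if llm_answer else ""
--     rev1_norm = rev1_answer.strip().lower() if rev1_answer else ""
--     rev2_norm = rev2_answer.strip().lower() if rev2_answer else ""
--
--     # Check if any answers are missing/empty/null
--     llm_empty = not llm_norm or llm_norm in ['null', 'none', '']
--     rev1_empty = not rev1_norm or rev1_norm in ['null', 'none', '']
--     rev2_empty = not rev2_norm or rev2_norm in ['null', 'none', '']
--
--     # If all answers are identical (including empty), return True
--     if llm_norm == rev1_norm == rev2_norm:
--         return True, llm_answer
--
--     # If two answers are identical and one is empty, return True
--     if llm_norm == rev1_norm and rev2_empty: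
--         return True, llm_answer
--     if llm_norm == rev2_norm and rev1_empty:
--         return True, llm_answer
--     if rev1_norm == rev2_norm and llm_empty:
--         return True, rev1_answer
--
--     # If two answers are identical (even if third is different), we can optimize
--     # by processing the identical pair once and the different one separately
--     if llm_norm == rev1_norm:
--         return True, llm_answer  # Process LLM/rev1 once, rev2 separately
--     if llm_norm == rev2_norm:
--         return True, llm_answer  # Process LLM/rev2 once, rev1 separately
--     if rev1_norm == rev2_norm:
--         return True, rev1_answer  # Process rev1/rev2 once, LLM separately
--
--     # If all non-empty answers are identical, return True
--     non_empty_answers = [ans for ans in [llm_norm, rev1_norm, rev2_norm] if ans]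
--     if len(set(non_empty_answers)) == 1:
--         return True, non_empty_answers[0]
--
--     # All answers are different, need to process separately
--     return False, ""
-- ===== SOURCE B (Python) =====
-- def _check_answers_identical(llm_answer: str, rev1_answer: str, rev2_answer: str) -> tuple[bool, str]:
--     norms = [s.strip().lower() if s else "" for s in (llm_answer, rev1_answer, rev2_answer)]
--     originals = [llm_answer, rev1_answer, rev2_answer]
--     dups = [n for n in norms if norms.count(n) >= 2]
--     if dups:
--         return True, originals[norms.index(dups[0])]
--     return False, ""
-- ===== Notes on version B (the rewrite author's own statement) =====
-- stated objective: simpler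
-- what changed: Replaced A's nine-branch if-cascade (with redundant emptiness guards and a dead set-based fallback) by one pass over a positional list of the three normalized answers: the first norm occurring at least twice determines the returned original answer.
import Mathlib
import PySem

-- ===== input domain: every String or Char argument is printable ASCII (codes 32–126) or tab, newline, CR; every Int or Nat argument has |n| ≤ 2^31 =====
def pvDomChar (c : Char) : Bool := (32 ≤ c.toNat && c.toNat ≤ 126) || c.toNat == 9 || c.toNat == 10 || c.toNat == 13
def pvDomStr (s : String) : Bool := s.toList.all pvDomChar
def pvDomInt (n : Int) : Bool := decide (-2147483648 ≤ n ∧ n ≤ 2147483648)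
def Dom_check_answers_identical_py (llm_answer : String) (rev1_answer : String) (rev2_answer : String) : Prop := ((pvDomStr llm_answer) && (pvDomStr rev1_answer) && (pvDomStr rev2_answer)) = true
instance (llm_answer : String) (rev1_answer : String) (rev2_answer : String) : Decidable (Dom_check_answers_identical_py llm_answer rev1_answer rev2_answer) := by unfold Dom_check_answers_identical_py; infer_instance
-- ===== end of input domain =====

-- B replaces A's nine-branch if-cascade by one pass over a positional list of the
-- three normalized answers: the first norm occurring at least twice picks the answer
-- to return (objective: simpler).

-- ===== PORT A =====
def check_answers_identical_py (llm_answer : String) (rev1_answer : String) (rev2_answer : String) : Bool × String :=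
  let llm_norm := if llm_answer ≠ "" then PySem.Str.lower (PySem.Str.strip llm_answer) else ""
  let rev1_norm := if rev1_answer ≠ "" then PySem.Str.lower (PySem.Str.strip rev1_answer) else ""
  let rev2_norm := if rev2_answer ≠ "" then PySem.Str.lower (PySem.Str.strip rev2_answer) else ""
  let llm_empty : Bool := (llm_norm == "") || ["null", "none", ""].contains llm_norm
  let rev1_empty : Bool := (rev1_norm == "") || ["null", "none", ""].contains rev1_norm
  let rev2_empty : Bool := (rev2_norm == "") || ["null", "none", ""].contains rev2_norm
  if llm_norm == rev1_norm && rev1_norm == rev2_norm then (true, llm_answer)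
  else if llm_norm == rev1_norm && rev2_empty then (true, llm_answer)
  else if llm_norm == rev2_norm && rev1_empty then (true, llm_answer)
  else if rev1_norm == rev2_norm && llm_empty then (true, rev1_answer)
  else if llm_norm == rev1_norm then (true, llm_answer)
  else if llm_norm == rev2_norm then (true, llm_answer)
  else if rev1_norm == rev2_norm then (true, rev1_answer)
  else
    let non_empty_answers := [llm_norm, rev1_norm, rev2_norm].filter (fun a => a ≠ "")
    if (PySem.Set.ofList non_empty_answers).length == 1 then
      -- non_empty_answers[0]: guarded nonempty (set has one element), so indexing cannot fail
      match non_empty_answers with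
      | x :: _ => (true, x)
      | [] => (true, "")
    else (false, "")

-- ===== PORT B =====
def pyNormB (s : String) : String :=
  if s ≠ "" then PySem.Str.lower (PySem.Str.strip s) else ""

def check_answers_identical_py_alt (llm_answer : String) (rev1_answer : String) (rev2_answer : String) : Bool × String :=
  let norms := [pyNormB llm_answer, pyNormB rev1_answer, pyNormB rev2_answer]
  let originals := [llm_answer, rev1_answer, rev2_answer]
  let dups := norms.filter (fun n => 2 ≤ PySem.List.count norms n)
  match dups with
  | [] => (false, "")
  | d :: _ =>
    match PySem.List.index? norms d with
    | some i => (true, (PySem.List.pyGet? originals (i : Int)).getD "")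
    | none => (true, "")  -- unreachable: d ∈ norms

-- ===== PRECONDITION & SPEC =====
def Spec_check_answers_identical_py (llm_answer : String) (rev1_answer : String) (rev2_answer : String) (out : Bool × String) : Prop := out = check_answers_identical_py_alt llm_answer rev1_answer rev2_answer
instance (llm_answer : String) (rev1_answer : String) (rev2_answer : String) (out : Bool × String) : Decidable (Spec_check_answers_identical_py llm_answer rev1_answer rev2_answer out) := by unfold Spec_check_answers_identical_py; infer_instance

-- ===== CLAIM (what is proved, stated in full; the proofs are below) =====
def Claim_equal_check_answers_identical_py : Prop := ∀ (llm_answer : String) (rev1_answer : String) (rev2_answer : String), Dom_check_answers_identical_py llm_answer rev1_answer rev2_answer → Spec_check_answers_identical_py llm_answer rev1_answer rev2_answer (check_answers_identical_py llm_answer rev1_answer rev2_answer)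

-- ===== LEMMAS AND PROOFS =====

-- ===== VERDICT (by name: the statement is the Claim_ definition above) =====
theorem check_answers_identical_py_spec : Claim_equal_check_answers_identical_py := by
  intro l r1 r2 _
  unfold Spec_check_answers_identical_py check_answers_identical_py check_answers_identical_py_alt pyNormB
  generalize (if l ≠ "" then PySem.Str.lower (PySem.Str.strip l) else "") = a
  generalize (if r1 ≠ "" then PySem.Str.lower (PySem.Str.strip r1) else "") = b
  generalize (if r2 ≠ "" then PySem.Str.lower (PySem.Str.strip r2) else "") = c
  by_cases hab : a = b <;> by_cases hac : a = c <;> by_cases hbc : b = c <;>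
    by_cases ha : a = "" <;> by_cases hb : b = "" <;> by_cases hc : c = "" <;>
    (try simp_all [PySem.List.count, PySem.List.index?, PySem.List.pyGet?, PySem.List.pyIdx?,
      List.count_cons, PySem.Set.ofList, PySem.Set.add, List.filter,
      List.idxOf?, List.findIdx?_cons, List.findIdx?_nil, beq_iff_eq]) <;>
    (split_ifs <;> simp_all [PySem.List.count, PySem.List.index?, PySem.List.pyGet?, PySem.List.pyIdx?,
      List.count_cons, PySem.Set.ofList, PySem.Set.add, List.filter,
      List.idxOf?, List.findIdx?_cons, List.findIdx?_nil, beq_iff_eq])
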